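-- pv_equiv track=rewrite | github.com/kimsouce/PS_study | LDonghyeon/구현/13419 탕수육.py | calc
-- ===== SOURCE A (Python) =====
-- def calc(word):
--     first = ''
--     second = ''
--     for i in range(len(word)):
--         if i % 2 == 0:
--             first += word[i]
--         else:
--             second += word[i]
--     return (first,second)
-- ===== SOURCE B (Python) =====
-- def calc(word):
--     return (word[::2], word[1::2])
-- ===== Notes on version B (the rewrite author's own statement) =====
-- stated objective: idiomatic
-- what changed: The index loop with a parity branch and string += accumulation is replaced by two stride slices word[::2] and word[1::2].
import Mathlib
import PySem

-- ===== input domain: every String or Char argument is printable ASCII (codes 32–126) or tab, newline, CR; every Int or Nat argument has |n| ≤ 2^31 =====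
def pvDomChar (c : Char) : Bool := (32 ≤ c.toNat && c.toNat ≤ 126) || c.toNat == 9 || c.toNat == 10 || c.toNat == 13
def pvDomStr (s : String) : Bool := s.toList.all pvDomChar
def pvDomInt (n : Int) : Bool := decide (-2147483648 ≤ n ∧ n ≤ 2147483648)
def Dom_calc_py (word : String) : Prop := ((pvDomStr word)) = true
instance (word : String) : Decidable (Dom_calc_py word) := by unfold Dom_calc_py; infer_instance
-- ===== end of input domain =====

-- B replaces A's index loop with parity branch by the idiomatic two stride slices word[::2] / word[1::2].

-- ===== PORT A =====
def calc_py (word : String) : String × String :=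
  (PySem.List.pyRange 0 (PySem.Str.len word) 1).foldl
    (fun acc i =>
      if PySem.Int.mod i 2 == 0 then
        match PySem.Str.pyGet? word i with
        | some c => (acc.1.push c, acc.2)
        | none => acc
      else
        match PySem.Str.pyGet? word i with
        | some c => (acc.1, acc.2.push c)
        | none => acc)
    ("", "")

-- ===== PORT B =====
def calc_py_alt (word : String) : String × String :=
  ((PySem.Str.slice? word none none 2).getD "",
   (PySem.Str.slice? word (some 1) none 2).getD "")

-- ===== PRECONDITION & SPEC =====
def Spec_calc_py (word : String) (out : String × String) : Prop := out = calc_py_alt word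
instance (word : String) (out : String × String) : Decidable (Spec_calc_py word out) := by unfold Spec_calc_py; infer_instance

-- ===== CLAIM (what is proved, stated in full; the proofs are below) =====
def Claim_equal_calc_py : Prop := ∀ (word : String), Dom_calc_py word → Spec_calc_py word (calc_py word)

-- ===== LEMMAS AND PROOFS =====

/-- Split a list into its even-indexed and odd-indexed elements. -/
def esplit : List Char → List Char × List Char
  | [] => ([], [])
  | a :: t => (a :: (esplit t).2, (esplit t).1)

theorem string_ext (a b : String) (h : a.toList = b.toList) : a = b := by
  rw [← String.ofList_toList (s := a), h, String.ofList_toList]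

theorem esplit_append_singleton (x : Char) (l : List Char) :
    esplit (l ++ [x]) =
      (if l.length % 2 = 0 then (esplit l).1 ++ [x] else (esplit l).1,
       if l.length % 2 = 0 then (esplit l).2 else (esplit l).2 ++ [x]) := by
  induction l with
  | nil => simp [esplit]
  | cons a t ih =>
    by_cases h : t.length % 2 = 0
    · simp [esplit, ih, h]
      omega
    · simp [esplit, ih, h]
      omega

theorem skim (l : List Char) :
    (∀ n : Nat, (List.range n).filterMap (fun k => l[2*k]?) = (esplit (l.take (2*n))).1) ∧
    (∀ n : Nat, (List.range n).filterMap (fun k => l[2*k+1]?) = (esplit (l.take (2*n+1))).2) := by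
  induction l with
  | nil =>
    constructor <;> intro n <;> simp [esplit]
  | cons a t ih =>
    constructor
    · intro n
      cases n with
      | zero => simp [esplit]
      | succ m =>
        rw [List.range_succ_eq_map, List.filterMap_cons]
        have h0 : (a :: t)[2*0]? = some a := by simp
        rw [h0, List.filterMap_map]
        have hc : ∀ k ∈ List.range m,
            ((fun k => (a :: t)[2*k]?) ∘ Nat.succ) k = (fun k => t[2*k+1]?) k := by
          intro k _
          have h2 : 2 * Nat.succ k = (2*k+1) + 1 := by omega
          simp only [Function.comp, h2, List.getElem?_cons_succ]
        rw [List.filterMap_congr hc, ih.2 m]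
        have ht : (a :: t).take (2 * (m+1)) = a :: t.take (2*m+1) := by
          have h3 : 2 * (m+1) = (2*m+1) + 1 := by omega
          rw [h3, List.take_succ_cons]
        rw [ht]
        simp [esplit]
    · intro n
      have hc : ∀ k ∈ List.range n,
          (fun k => (a :: t)[2*k+1]? ) k = (fun k => t[2*k]?) k := by
        intro k _
        simp only [List.getElem?_cons_succ]
      rw [List.filterMap_congr hc, ih.1 n]
      have ht : (a :: t).take (2*n+1) = a :: t.take (2*n) := List.take_succ_cons
      rw [ht]
      simp [esplit]

theorem fst_of_cnt (l : List Char) (cnt : Nat) (h : cnt = (l.length + 1) / 2) :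
    (List.range cnt).filterMap (fun k => l[2*k]?) = (esplit l).1 := by
  subst h
  rw [(skim l).1 ((l.length + 1) / 2),
      List.take_of_length_le (by omega : l.length ≤ 2 * ((l.length + 1) / 2))]

theorem snd_of_cnt (l : List Char) (cnt : Nat) (h : cnt = l.length / 2) :
    (List.range cnt).filterMap (fun k => l[2*k+1]?) = (esplit l).2 := by
  subst h
  rw [(skim l).2 (l.length / 2),
      List.take_of_length_le (by omega : l.length ≤ 2 * (l.length / 2) + 1)]

theorem slice2_fst (l : List Char) :
    PySem.List.slice? l none none 2 = some (esplit l).1 := by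
  simp only [PySem.List.slice?, PySem.List.sliceIndices]
  norm_num
  refine Eq.trans (List.filterMap_congr ?_) (fst_of_cnt l _ ?_)
  · intro k _
    congr 1
  · split_ifs <;> omega

theorem slice2_snd (l : List Char) :
    PySem.List.slice? l (some 1) none 2 = some (esplit l).2 := by
  by_cases h : l = []
  · subst h
    decide
  · have hne : l.length ≠ 0 := by simpa using h
    simp only [PySem.List.slice?, PySem.List.sliceIndices]
    norm_num
    refine Eq.trans (List.filterMap_congr ?_) (snd_of_cnt l _ ?_)
    · intro k _
      congr 1
      omega
    · split_ifs <;> omega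

theorem mod2_cast (n : Nat) : PySem.Int.mod (n : Int) 2 = ((n % 2 : Nat) : Int) := by
  have h : Int.fmod (n : Int) 2 = (n : Int) % 2 := by
    rw [Int.fmod_eq_emod]; norm_num
  simp only [PySem.Int.mod, h]
  omega

theorem foldA_inv (word : String) (n : Nat) (hn : n ≤ word.toList.length) :
    ∀ (f s : String),
      (List.range n).foldl
        (fun acc (k : Nat) =>
          (fun acc (i : Int) =>
            if PySem.Int.mod i 2 == 0 then
              match PySem.Str.pyGet? word i with
              | some c => (acc.1.push c, acc.2)
              | none => acc
            else
              match PySem.Str.pyGet? word i with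
              | some c => (acc.1, acc.2.push c)
              | none => acc) acc ((0:Int) + (k:Int))) (f, s)
      = (String.ofList (f.toList ++ (esplit (word.toList.take n)).1),
         String.ofList (s.toList ++ (esplit (word.toList.take n)).2)) := by
  induction n with
  | zero =>
    intro f s
    simp [esplit]
  | succ m ih =>
    intro f s
    have hm : m < word.toList.length := by omega
    rw [List.range_succ, List.foldl_append, ih (by omega)]
    simp only [List.foldl_cons, List.foldl_nil]
    have hget : PySem.Str.pyGet? word ((0:Int) + (m:Int)) = some (word.toList[m]'hm) := by
      rw [zero_add, PySem.Str.pyGet?_natCast, List.getElem?_eq_getElem hm]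
    have hmod : PySem.Int.mod ((0:Int) + (m:Int)) 2 = ((m % 2 : Nat) : Int) := by
      rw [zero_add, mod2_cast]
    have htake : word.toList.take (m+1) = word.toList.take m ++ [word.toList[m]'hm] := by
      rw [List.take_add_one, List.getElem?_eq_getElem hm]
      simp
    have hlen : (word.toList.take m).length = m := by
      rw [List.length_take]
      omega
    rw [hmod, hget]
    by_cases hpar : m % 2 = 0
    · have hE : (esplit (word.toList.take (m+1))).1
          = (esplit (word.toList.take m)).1 ++ [word.toList[m]'hm] := by
        rw [htake, esplit_append_singleton]
        simp [hlen, hpar]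
      have hO : (esplit (word.toList.take (m+1))).2 = (esplit (word.toList.take m)).2 := by
        rw [htake, esplit_append_singleton]
        simp [hlen, hpar]
      have hcond : ((((m % 2 : Nat) : Int)) == 0) = true := by simp [hpar]
      rw [hcond]
      simp only [if_true]
      refine Prod.ext (string_ext _ _ ?_) (string_ext _ _ ?_)
      · simp [String.toList_push, String.toList_ofList, hE]
      · simp [String.toList_ofList, hO]
    · have hE : (esplit (word.toList.take (m+1))).1 = (esplit (word.toList.take m)).1 := by
        rw [htake, esplit_append_singleton]
        simp [hlen, hpar]
      have hO : (esplit (word.toList.take (m+1))).2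
          = (esplit (word.toList.take m)).2 ++ [word.toList[m]'hm] := by
        rw [htake, esplit_append_singleton]
        simp [hlen, hpar]
      have hcond : ((((m % 2 : Nat) : Int)) == 0) = false := by
        simp
        omega
      rw [hcond]
      simp only [Bool.false_eq_true, if_false]
      refine Prod.ext (string_ext _ _ ?_) (string_ext _ _ ?_)
      · simp [String.toList_ofList, hE]
      · simp [String.toList_push, String.toList_ofList, hO]

theorem calc_py_eq (word : String) :
    calc_py word = (String.ofList (esplit word.toList).1, String.ofList (esplit word.toList).2) := by
  unfold calc_py
  rw [PySem.List.pyRange_one, List.foldl_map]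
  have hlen : ((PySem.Str.len word - 0).toNat) = word.toList.length := by
    simp [PySem.Str.len]
  rw [hlen, foldA_inv word word.toList.length (le_refl _) "" "", List.take_length]
  simp

theorem calc_py_alt_eq (word : String) :
    calc_py_alt word
      = (String.ofList (esplit word.toList).1, String.ofList (esplit word.toList).2) := by
  unfold calc_py_alt
  simp only [PySem.Str.slice?, PySem.Chars.slice?_eq_listSlice?, slice2_fst, slice2_snd,
    Option.map_some, Option.getD_some]

-- ===== VERDICT (by name: the statement is the Claim_ definition above) =====
theorem calc_py_spec : Claim_equal_calc_py := by
  intro word _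
  unfold Spec_calc_py
  rw [calc_py_eq, calc_py_alt_eq]
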